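-- pv_equiv track=rewrite | github.com/AmziJeffs/LaborData | utilities.py | who_being_charged
-- ===== SOURCE A (Python) =====
-- def parse_party(party):
--     party_types = ["Legal Representative","Employer","Union","Individual","Additional Service","Notification","Union as an Employer"]
--     for party_type in party_types:
--         if party.startswith(party_type):
--             if party.startswith(party_type+","):
--                 return [s.strip() for s in party.split(",", 1)]
--             else:
--                 return [party_type, party.split(party_type, 1)[1]]
--     return ["", party]
--
-- def who_being_charged(charged):
--     employer_charged = False
--     union_charged = False
--     for p in charged:
--         p = parse_party(p)
--         if p[0] == "Employer":
--             employer_charged = True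
--         elif p[0] == "Union":
--             union_charged = True
--     match [employer_charged, union_charged]:
--     	case [True, False]:
--     		return "Employer"
--     	case [False, True]:
--     		return "Union"
--     	case _:
--     		return "Other"
-- ===== SOURCE B (Python) =====
-- def who_being_charged(charged):
--     employer = any(p.startswith("Employer") for p in charged)
--     union = any(p.startswith("Union") for p in charged)
--     if employer and not union:
--         return "Employer"
--     if union and not employer:
--         return "Union"
--     return "Other"
-- ===== Notes on version B (the rewrite author's own statement) =====
-- stated objective: simpler
-- what changed: Drops the parse_party helper (its prefix loop, comma split and strip) entirely and computes the two flags directly as any(p.startswith("Employer"))/any(p.startswith("Union")), which is correct because parse_party's first component equals "Employer"/"Union" exactly when the string has that prefix.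
import Mathlib
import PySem

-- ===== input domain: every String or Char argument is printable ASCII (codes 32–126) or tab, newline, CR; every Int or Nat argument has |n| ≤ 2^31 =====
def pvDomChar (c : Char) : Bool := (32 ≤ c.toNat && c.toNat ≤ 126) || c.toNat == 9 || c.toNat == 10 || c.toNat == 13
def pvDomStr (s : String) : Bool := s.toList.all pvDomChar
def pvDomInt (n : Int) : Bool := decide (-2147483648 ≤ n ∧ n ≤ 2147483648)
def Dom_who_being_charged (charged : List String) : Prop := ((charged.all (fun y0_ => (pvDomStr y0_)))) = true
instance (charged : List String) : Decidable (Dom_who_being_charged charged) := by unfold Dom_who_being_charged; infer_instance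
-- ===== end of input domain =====

-- B drops parse_party entirely and computes the two flags as prefix tests ('any(p.startswith(...))');
-- objective: simpler (same O(n) cost; equivalence rests on parse_party's head reducing to startswith).

-- ===== PORT A =====
def pvPartyTypes : List String :=
  ["Legal Representative","Employer","Union","Individual","Additional Service","Notification","Union as an Employer"]

-- the 'for party_type in party_types' loop of parse_party
def parse_party_go (party : String) : List String → List String
  | [] => ["", party]
  | t :: ts =>
    if PySem.Str.startswith party t then
      if PySem.Str.startswith party (t ++ ",") then
        ((PySem.Str.splitMax? party "," 1).getD []).map PySem.Str.strip
        -- sep "," is nonempty, so splitMax? is never none; .getD [] is unreachable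
      else
        [t, ((PySem.List.pyGet? ((PySem.Str.splitMax? party t 1).getD []) 1).getD "")]
        -- t is a nonempty literal occurring in party (it is a prefix), so the split is some
        -- list of length ≥ 2 and both defaults are unreachable
    else parse_party_go party ts

def parse_party (party : String) : List String := parse_party_go party pvPartyTypes

def who_being_charged (charged : List String) : String :=
  match charged.foldl (fun (st : Bool × Bool) p0 =>
      let p := parse_party p0
      -- p[0]: parse_party always returns a list of length ≥ 2, so headD's default is unreachable
      if (p.headD "") = "Employer" then (true, st.2)
      else if (p.headD "") = "Union" then (st.1, true)
      else st)
    (false, false) with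
  | (true, false) => "Employer"
  | (false, true) => "Union"
  | _ => "Other"

-- ===== PORT B =====
def who_being_charged_alt (charged : List String) : String :=
  let employer := charged.any (fun p => PySem.Str.startswith p "Employer")
  let union := charged.any (fun p => PySem.Str.startswith p "Union")
  if employer && !union then "Employer"
  else if union && !employer then "Union"
  else "Other"

-- ===== PRECONDITION & SPEC =====
def Spec_who_being_charged (charged : List String) (out : String) : Prop := out = who_being_charged_alt charged
instance (charged : List String) (out : String) : Decidable (Spec_who_being_charged charged out) := by unfold Spec_who_being_charged; infer_instance

-- ===== CLAIM (what is proved, stated in full; the proofs are below) =====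
def Claim_equal_who_being_charged : Prop := ∀ (charged : List String), Dom_who_being_charged charged → Spec_who_being_charged charged (who_being_charged charged)

-- ===== LEMMAS AND PROOFS =====

-- split's worker with maxsplit exhausted returns the rest as one piece
lemma go_m0 (sep : List Char) : ∀ (fuel : Nat) (l cur : List Char) (acc : List (List Char)),
    PySem.Chars.splitOnMax.go sep fuel 0 l cur acc = ((cur.reverse ++ l) :: acc).reverse := by
  intro fuel l cur acc
  cases fuel with
  | zero => simp [PySem.Chars.splitOnMax.go]
  | succ n => cases l with
    | nil => simp [PySem.Chars.splitOnMax.go]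
    | cons c t => simp [PySem.Chars.splitOnMax.go]

-- split(·, ",", 1) on pre ++ "," ++ r with comma-free pre yields the two pieces [pre, r]
lemma go_comma : ∀ (pre : List Char), ',' ∉ pre → ∀ (fuel : Nat) (r cur : List Char) (acc : List (List Char)),
    pre.length < fuel →
    PySem.Chars.splitOnMax.go [','] fuel 1 (pre ++ ',' :: r) cur acc
      = acc.reverse ++ [cur.reverse ++ pre, r] := by
  intro pre
  induction pre with
  | nil =>
    intro _ fuel r cur acc hf
    cases fuel with
    | zero => omega
    | succ n =>
      simp only [List.nil_append]
      rw [PySem.Chars.splitOnMax.go]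
      simp [go_m0]
  | cons c pre ih =>
    intro hc fuel r cur acc hf
    cases fuel with
    | zero => simp at hf
    | succ n =>
      have hcc : c ≠ ',' := fun h => hc (by simp [h])
      rw [List.cons_append, PySem.Chars.splitOnMax.go]
      have : [','].isPrefixOf (c :: (pre ++ ',' :: r)) = false := by
        simp [List.isPrefixOf]; exact fun h => absurd h.symm hcc
      simp only [this]
      simp only [if_neg (by omega : ¬ (1 : Nat) = 0), Bool.false_eq_true, if_false]
      rw [ih (fun h => hc (List.mem_cons_of_mem _ h)) n r (c :: cur) acc (by simpa using Nat.lt_of_succ_lt_succ hf)]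
      simp

-- head of parse_party's comma branch is the matched (strip-invariant, comma-free) party type
lemma head_branch (s T : String) (hc : ',' ∉ T.toList) (hstrip : PySem.Str.strip T = T)
    (h2 : PySem.Str.startswith s (T ++ ",") = true) :
    (((PySem.Str.splitMax? s "," 1).getD []).map PySem.Str.strip).headD "" = T := by
  rw [PySem.Str.startswith_eq, PySem.Chars.startswith_iff] at h2
  obtain ⟨r, hr⟩ := h2
  have hTL : (T ++ ",").toList = T.toList ++ [','] := by simp
  rw [hTL] at hr
  have hs : s.toList = T.toList ++ ',' :: r := by rw [← hr]; simp
  simp only [PySem.Str.splitMax?, PySem.Chars.splitMax?]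
  simp only [hs]
  rw [PySem.Chars.splitOnMax]
  simp only [show ",".toList = [','] from rfl]
  simp only [if_neg (by norm_num : ¬ ((1:Int) < 0)), Int.toNat_one]
  rw [go_comma T.toList hc _ r [] [] (by simp)]
  simpa using hstrip

-- two incomparable literals cannot both be prefixes of s
lemma sw_excl (s p q : String) (h1 : ¬ p.toList <+: q.toList) (h2 : ¬ q.toList <+: p.toList)
    (hp : PySem.Str.startswith s p = true) : PySem.Str.startswith s q = false := by
  rw [PySem.Str.startswith_eq, PySem.Chars.startswith_iff] at hp
  rw [PySem.Str.startswith_eq]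
  by_contra hq
  rw [Bool.not_eq_false, PySem.Chars.startswith_iff] at hq
  rcases List.prefix_or_prefix_of_prefix hp hq with h | h
  · exact h1 h
  · exact h2 h

lemma head_else (s t : String) (h : PySem.Str.startswith s t = false) (ts : List String) :
    parse_party_go s (t :: ts) = parse_party_go s ts := by
  rw [parse_party_go]
  simp only [h, Bool.false_eq_true, if_false]

lemma head_hit (s t : String) (h : PySem.Str.startswith s t = true)
    (hc : ',' ∉ t.toList) (hstrip : PySem.Str.strip t = t) (ts : List String) :
    (parse_party_go s (t :: ts)).headD "" = t := by
  rw [parse_party_go]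
  simp only [h, if_true]
  by_cases h2 : PySem.Str.startswith s (t ++ ",") = true
  · simp only [h2, if_true]
    exact head_branch s t hc hstrip h2
  · simp only [h2]
    simp

-- the key reduction: parse_party's head is "Employer"/"Union" exactly when the string starts with it
lemma head_parse (s : String) :
    (((parse_party s).headD "" = "Employer") ↔ PySem.Str.startswith s "Employer" = true)
    ∧ (((parse_party s).headD "" = "Union") ↔ PySem.Str.startswith s "Union" = true) := by
  unfold parse_party pvPartyTypes
  by_cases h1 : PySem.Str.startswith s "Legal Representative" = true
  · rw [head_hit s _ h1 (by decide) (by decide)]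
    rw [sw_excl s _ "Employer" (by decide) (by decide) h1,
        sw_excl s _ "Union" (by decide) (by decide) h1]
    decide
  · rw [Bool.not_eq_true] at h1
    rw [head_else s _ h1]
    by_cases h2 : PySem.Str.startswith s "Employer" = true
    · rw [head_hit s _ h2 (by decide) (by decide)]
      rw [h2, sw_excl s _ "Union" (by decide) (by decide) h2]
      decide
    · rw [Bool.not_eq_true] at h2
      rw [head_else s _ h2]
      by_cases h3 : PySem.Str.startswith s "Union" = true
      · rw [head_hit s _ h3 (by decide) (by decide)]
        rw [h2, h3]
        decide
      · rw [Bool.not_eq_true] at h3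
        rw [head_else s _ h3]
        by_cases h4 : PySem.Str.startswith s "Individual" = true
        · rw [head_hit s _ h4 (by decide) (by decide)]
          rw [h2, h3]
          decide
        · rw [Bool.not_eq_true] at h4
          rw [head_else s _ h4]
          by_cases h5 : PySem.Str.startswith s "Additional Service" = true
          · rw [head_hit s _ h5 (by decide) (by decide)]
            rw [h2, h3]
            decide
          · rw [Bool.not_eq_true] at h5
            rw [head_else s _ h5]
            by_cases h6 : PySem.Str.startswith s "Notification" = true
            · rw [head_hit s _ h6 (by decide) (by decide)]
              rw [h2, h3]
              decide
            · rw [Bool.not_eq_true] at h6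
              rw [head_else s _ h6]
              by_cases h7 : PySem.Str.startswith s "Union as an Employer" = true
              · rw [head_hit s _ h7 (by decide) (by decide)]
                rw [h2, h3]
                decide
              · rw [Bool.not_eq_true] at h7
                rw [head_else s _ h7]
                rw [show parse_party_go s [] = ["", s] from rfl]
                rw [h2, h3]
                simp

-- A's flag loop computes B's two 'any' tests
lemma flags_eq : ∀ (charged : List String) (a b : Bool),
    charged.foldl (fun (st : Bool × Bool) p0 =>
      let p := parse_party p0
      if (p.headD "") = "Employer" then (true, st.2)
      else if (p.headD "") = "Union" then (st.1, true)
      else st) (a, b)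
    = (a || charged.any (fun p => PySem.Str.startswith p "Employer"),
       b || charged.any (fun p => PySem.Str.startswith p "Union")) := by
  intro charged
  induction charged with
  | nil => intro a b; simp
  | cons s t ih =>
    intro a b
    simp only [List.foldl_cons, List.any_cons]
    obtain ⟨hE, hU⟩ := head_parse s
    by_cases he : (parse_party s).headD "" = "Employer"
    · have hsE : PySem.Str.startswith s "Employer" = true := hE.1 he
      have hsU : PySem.Str.startswith s "Union" = false :=
        sw_excl s _ _ (by decide) (by decide) hsE
      rw [if_pos he, hsE, hsU, ih]
      simp
    · have hsE : PySem.Str.startswith s "Employer" = false :=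
        Bool.eq_false_iff.mpr (fun h => he (hE.2 h))
      by_cases hu : (parse_party s).headD "" = "Union"
      · have hsU : PySem.Str.startswith s "Union" = true := hU.1 hu
        rw [if_neg he, if_pos hu, hsE, hsU, ih]
        simp
      · have hsU : PySem.Str.startswith s "Union" = false :=
          Bool.eq_false_iff.mpr (fun h => hu (hU.2 h))
        rw [if_neg he, if_neg hu, hsE, hsU, ih]
        simp

-- ===== VERDICT (by name: the statement is the Claim_ definition above) =====
theorem who_being_charged_spec : Claim_equal_who_being_charged := by
  intro charged _
  unfold Spec_who_being_charged who_being_charged who_being_charged_alt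
  rw [flags_eq charged false false]
  cases hE : charged.any (fun p => PySem.Str.startswith p "Employer")
  <;> cases hU : charged.any (fun p => PySem.Str.startswith p "Union")
  <;> rfl
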